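-- pv_equiv track=rewrite | github.com/maercaestro/megat-sukatoken | src/sukatoken_bak.py | tokenize_suku_kata
-- ===== SOURCE A (Python) =====
-- def tokenize_suku_kata(text):
--     """Tokenizes a word or sentence into Malay suku kata using refined rules. The rules are quite simple:
--     1.  A suku kata is a consonant followed by a vowel (CV)
--     2.  A suku kata boundary is determined by a vowel
--     3.  Then next C after CV should be followed by V, if not, the C is added to the previous suku kata (CVC)
--     3.  If no CV pattern is found, the character is added as is
--     4.  Prefixes are handled separately
--     """
--     tokens = []
--     i = 0
--     while i < len(text):
--         # Check for consonant followed by vowel (CV)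
--         if i + 1 < len(text) and text[i] in "bcdfghjklmnpqrstvwxyz" and text[i + 1] in "aeiou":
--             # Start of a suku kata
--             start = i
--             i += 2  # Move past the CV
--
--             # Look ahead to determine the suku kata boundary
--             while i < len(text):
--                 if text[i] in "aeiou":
--                     # Found another vowel, stop the current token
--                     break
--                 elif i + 1 < len(text) and text[i] in "bcdfghjklmnpqrstvwxyz" and text[i + 1] in "aeiou":
--                     # Found a new CV pattern, stop the current token
--                     break
--                 else:
--                     # Continue adding consonants
--                     i += 1
--
--             # Add the token
--             tokens.append(text[start:i])
--         else:
--             # If no CV pattern is found, add the character as is and move on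
--             tokens.append(text[i])
--             i += 1
--
--     return tokens
-- ===== SOURCE B (Python) =====
-- def tokenize_suku_kata(text):
--     """Two-pass tokenizer: precompute, for every position, whether the inner
--     scan of the CV rule would stop there (vowel or CV start), fill a
--     next-stop jump table right-to-left, then emit tokens with direct jumps."""
--     n = len(text)
--     cons = "bcdfghjklmnpqrstvwxyz"
--     vows = "aeiou"
--     cv = [i + 1 < n and text[i] in cons and text[i + 1] in vows for i in range(n)]
--     stop = [cv[i] or text[i] in vows for i in range(n)]
--     nxt = [n] * (n + 1)          # nxt[k] = smallest j >= k with stop[j], else n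
--     for k in range(n - 1, -1, -1):
--         nxt[k] = k if stop[k] else nxt[k + 1]
--     tokens = []
--     i = 0
--     while i < n:
--         if cv[i]:
--             j = nxt[i + 2]
--             tokens.append(text[i:j])
--             i = j
--         else:
--             tokens.append(text[i])
--             i += 1
--     return tokens
-- ===== Notes on version B (the rewrite author's own statement) =====
-- stated objective: alternative
-- what changed: Replaces the nested pointer state machine (outer scan with an inner look-ahead loop per CV token) by a table-driven two-pass tokenizer: precompute per-position CV/stop flags and a right-to-left next-stop jump table, then emit tokens in one forward pass with direct jumps.
import Mathlib
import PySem

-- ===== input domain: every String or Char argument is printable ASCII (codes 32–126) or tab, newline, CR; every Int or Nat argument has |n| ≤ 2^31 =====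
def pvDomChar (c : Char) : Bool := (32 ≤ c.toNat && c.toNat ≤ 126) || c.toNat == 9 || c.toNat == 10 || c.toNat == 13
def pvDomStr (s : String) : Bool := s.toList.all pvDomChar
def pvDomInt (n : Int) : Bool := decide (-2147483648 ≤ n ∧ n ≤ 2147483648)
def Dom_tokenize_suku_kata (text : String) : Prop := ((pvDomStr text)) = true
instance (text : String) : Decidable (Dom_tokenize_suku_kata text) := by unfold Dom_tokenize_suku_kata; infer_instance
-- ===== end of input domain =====

-- B replaces A's nested pointer state machine by a precomputed stop/jump table
-- and a single forward pass with direct jumps (objective: alternative, same cost).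

-- character-class tests, literal ports of `c in "bcdfghjklmnpqrstvwxyz"` / `c in "aeiou"`
def pvIsCons (c : Char) : Bool := ("bcdfghjklmnpqrstvwxyz".toList).contains c
def pvIsVowel (c : Char) : Bool := ("aeiou".toList).contains c
-- `i + 1 < len(text) and text[i] in consonants and text[i+1] in vowels`
-- (the getD default is never read: it is guarded by i+1 < length)
def pvCvAt (s : List Char) (i : Nat) : Bool :=
  decide (i + 1 < s.length) && pvIsCons (s.getD i ' ') && pvIsVowel (s.getD (i + 1) ' ')

-- ===== PORT A =====
-- the inner `while` of A: advance i until a vowel or a new CV pattern (or end)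
def tokA_inner (s : List Char) (i : Nat) : Nat :=
  if h : i < s.length then
    if pvIsVowel (s.getD i ' ') then i
    else if pvCvAt s i then i
    else tokA_inner s (i + 1)
  else i
termination_by s.length - i
decreasing_by omega

-- cited by tokA_loop's decreasing_by (the inner loop never moves i backwards)
theorem tokA_inner_ge (s : List Char) (i : Nat) : i ≤ tokA_inner s i := by
  fun_induction tokA_inner s i <;> omega

-- the outer `while` of A; text[start:i] with 0 ≤ start ≤ i is exactly drop/take
def tokA_loop (s : List Char) (i : Nat) : List (List Char) :=
  if h : i < s.length then
    if pvCvAt s i then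
      ((s.drop i).take (tokA_inner s (i + 2) - i)) :: tokA_loop s (tokA_inner s (i + 2))
    else
      [s.getD i ' '] :: tokA_loop s (i + 1)
  else []
termination_by s.length - i
decreasing_by
  · have := tokA_inner_ge s (i + 2); omega
  · omega

def tokenize_suku_kata (text : String) : List String :=
  (tokA_loop text.toList 0).map String.ofList

-- ===== PORT B =====
-- the backward fill `for k in range(n-1,-1,-1): nxt[k] = k if stop[k] else nxt[k+1]`,
-- built as a list: tokB_fill stop n m holds the entries for indices n-m .. n
def tokB_fill (stop : List Bool) (n : Nat) : Nat → List Nat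
  | 0 => [n]
  | m + 1 =>
    let acc := tokB_fill stop n m
    (if stop.getD (n - (m + 1)) false then n - (m + 1) else acc.headD n) :: acc

-- the forward `while` of B: emit a token per step, jumping via the nxt table
-- (fuel n suffices: i strictly increases each iteration)
def tokB_loop (s : List Char) (cv : List Bool) (nxt : List Nat) : Nat → Nat → List (List Char)
  | 0, _ => []
  | fuel + 1, i =>
    if i < s.length then
      if cv.getD i false then
        ((s.drop i).take (nxt.getD (i + 2) s.length - i)) :: tokB_loop s cv nxt fuel (nxt.getD (i + 2) s.length)
      else
        [s.getD i ' '] :: tokB_loop s cv nxt fuel (i + 1)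
    else []

def tokenize_suku_kata_alt (text : String) : List String :=
  let s := text.toList
  let n := s.length
  let cv := (List.range n).map (fun i => pvCvAt s i)
  let stop := (List.range n).map (fun k => cv.getD k false || pvIsVowel (s.getD k ' '))
  let nxt := tokB_fill stop n n
  (tokB_loop s cv nxt n 0).map String.ofList

-- ===== PRECONDITION & SPEC =====
def Spec_tokenize_suku_kata (text : String) (out : List String) : Prop := out = tokenize_suku_kata_alt text
instance (text : String) (out : List String) : Decidable (Spec_tokenize_suku_kata text out) := by unfold Spec_tokenize_suku_kata; infer_instance

-- ===== CLAIM (what is proved, stated in full; the proofs are below) =====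
def Claim_equal_tokenize_suku_kata : Prop := ∀ (text : String), Dom_tokenize_suku_kata text → Spec_tokenize_suku_kata text (tokenize_suku_kata text)

-- ===== LEMMAS AND PROOFS =====

theorem getD_range_map {α : Type} (f : Nat → α) (n k : Nat) (d : α) :
    ((List.range n).map f).getD k d = if k < n then f k else d := by
  by_cases h : k < n
  · simp [List.getD, h]
  · rw [if_neg h, List.getD_eq_getElem?_getD, List.getElem?_eq_none (by simpa using h)]
    rfl

theorem headD_eq_getD {α : Type} (l : List α) (d : α) : l.headD d = l.getD 0 d := by
  cases l <;> rfl

-- B's stop table, with the cv-table lookup inlined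
theorem stop_list_eq (s : List Char) :
    (List.range s.length).map
        (fun k => ((List.range s.length).map (fun i => pvCvAt s i)).getD k false || pvIsVowel (s.getD k ' '))
      = (List.range s.length).map (fun k => pvCvAt s k || pvIsVowel (s.getD k ' ')) := by
  apply List.map_congr_left
  intro k hk
  rw [List.mem_range] at hk
  rw [getD_range_map, if_pos hk]

-- the nxt table computes exactly A's inner-loop stop index
theorem fill_getD (s : List Char) :
    ∀ m idx, m ≤ s.length → idx ≤ m →
      (tokB_fill ((List.range s.length).map (fun k => pvCvAt s k || pvIsVowel (s.getD k ' '))) s.length m).getD idx s.length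
        = tokA_inner s (s.length - m + idx) := by
  intro m
  induction m with
  | zero =>
    intro idx _ hidx
    interval_cases idx
    rw [tokA_inner]
    simp [tokB_fill]
  | succ m ih =>
    intro idx hm hidx
    rw [tokB_fill]
    cases idx with
    | succ i' =>
      simp only [List.getD_cons_succ]
      rw [ih i' (by omega) (by omega)]
      congr 1
      omega
    | zero =>
      simp only [List.getD_cons_zero]
      set k := s.length - (m + 1) with hk
      have hkn : k < s.length := by omega
      have hres : s.length - (m + 1) + 0 = k := by omega
      rw [hres, getD_range_map, if_pos hkn, tokA_inner, dif_pos hkn]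
      by_cases hv : pvIsVowel (s.getD k ' ') = true
      · rw [if_pos hv, if_pos (show (pvCvAt s k || pvIsVowel (s.getD k ' ')) = true by rw [hv]; exact Bool.or_true _)]
      · rw [if_neg hv]
        by_cases hc : pvCvAt s k = true
        · rw [if_pos hc, if_pos (show (pvCvAt s k || pvIsVowel (s.getD k ' ')) = true by rw [hc]; exact Bool.true_or _)]
        · rw [if_neg hc,
              if_neg (show ¬ (pvCvAt s k || pvIsVowel (s.getD k ' ')) = true by
                rw [Bool.eq_false_iff.mpr hc, Bool.false_or]; exact hv),
              headD_eq_getD, ih 0 (by omega) (by omega)]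
          congr 1
          omega

theorem loop_eq (s : List Char) :
    ∀ fuel i, s.length - i ≤ fuel →
      tokB_loop s ((List.range s.length).map (fun i => pvCvAt s i))
          (tokB_fill ((List.range s.length).map (fun k => pvCvAt s k || pvIsVowel (s.getD k ' '))) s.length s.length)
          fuel i
        = tokA_loop s i := by
  intro fuel
  induction fuel with
  | zero =>
    intro i hfi
    rw [tokA_loop]
    have : ¬ i < s.length := by omega
    simp [tokB_loop, this]
  | succ fuel ih =>
    intro i hfi
    rw [tokB_loop, tokA_loop]
    by_cases hi : i < s.length
    · rw [if_pos hi, dif_pos hi, getD_range_map, if_pos hi]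
      by_cases hc : pvCvAt s i = true
      · rw [if_pos hc, if_pos hc]
        have hlen : i + 1 < s.length := by
          have := hc
          unfold pvCvAt at this
          simp only [Bool.and_eq_true, decide_eq_true_eq] at this
          exact this.1.1
        have hj : (tokB_fill ((List.range s.length).map (fun k => pvCvAt s k || pvIsVowel (s.getD k ' '))) s.length s.length).getD (i + 2) s.length
            = tokA_inner s (i + 2) := by
          have := fill_getD s s.length (i + 2) (le_refl _) (by omega)
          simpa [Nat.sub_self] using this
        rw [hj]
        have hge := tokA_inner_ge s (i + 2)
        rw [ih (tokA_inner s (i + 2)) (by omega)]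
      · rw [if_neg hc, if_neg hc]
        rw [ih (i + 1) (by omega)]
    · rw [if_neg hi, dif_neg hi]

-- ===== VERDICT (by name: the statement is the Claim_ definition above) =====
theorem tokenize_suku_kata_spec : Claim_equal_tokenize_suku_kata := by
  intro text _
  unfold Spec_tokenize_suku_kata tokenize_suku_kata tokenize_suku_kata_alt
  simp only []
  congr 1
  rw [stop_list_eq]
  exact (loop_eq text.toList text.toList.length 0 (by omega)).symm
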